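-- pv_equiv track=rewrite | github.com/MrBrantCode/unitest_baseline | mut_generate/mist_train_taco/taco_15184/solution.py | maximize_equal_elements
-- ===== SOURCE A (Python) =====
-- def maximize_equal_elements(sequence):
--     cnt = {}
--
--     def add(x):
--         if x in cnt:
--             cnt[x] += 1
--         else:
--             cnt[x] = 1
--
--     for x in sequence:
--         add(x - 1)
--         add(x)
--         add(x + 1)
--
--     counts = map(lambda x: x[1], cnt.items())
--     return max(counts)
-- ===== SOURCE B (Python) =====
-- def maximize_equal_elements(sequence):
--     freq = {}
--     for x in sequence:
--         freq[x] = freq.get(x, 0) + 1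
--     candidates = {c for v in freq for c in (v - 1, v, v + 1)}
--     return max(freq.get(c - 1, 0) + freq.get(c, 0) + freq.get(c + 1, 0)
--                for c in candidates)
-- ===== Notes on version B (the rewrite author's own statement) =====
-- stated objective: alternative
-- what changed: A increments one dict at x-1, x, x+1 for every element and takes the max of its values; B builds a plain histogram of the sequence in one pass and then maximizes the windowed sum freq[c-1]+freq[c]+freq[c+1] over the set of candidate centers v-1, v, v+1 of the distinct values.
import Mathlib
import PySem

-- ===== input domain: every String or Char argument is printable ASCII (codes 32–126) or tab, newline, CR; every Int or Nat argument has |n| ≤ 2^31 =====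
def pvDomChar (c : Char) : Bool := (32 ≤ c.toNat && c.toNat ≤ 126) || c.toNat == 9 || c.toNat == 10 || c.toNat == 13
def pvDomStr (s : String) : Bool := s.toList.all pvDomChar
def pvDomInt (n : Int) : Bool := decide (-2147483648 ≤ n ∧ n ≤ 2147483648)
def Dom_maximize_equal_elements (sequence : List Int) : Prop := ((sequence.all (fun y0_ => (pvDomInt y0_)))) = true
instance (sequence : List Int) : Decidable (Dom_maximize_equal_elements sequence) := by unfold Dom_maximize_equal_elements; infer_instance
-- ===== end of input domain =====

-- B replaces A's per-element triple increment of a ±1-smeared dict by a plain histogram of the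
-- sequence plus a windowed sum over candidate centers (alternative decomposition, same cost).

-- ===== PORT A =====
-- A: one dict cnt, incremented at x-1, x, x+1 for every x; returns max(cnt.values()).
def maximize_equal_elements (sequence : List Int) : Int :=
  -- cnt = the dict after the add-loop; counts = cnt.values(); result = max(counts)
  (PySem.List.max?
      (sequence.foldl
        (fun d x =>
          ((d.modify (x - 1) 0 (· + 1)).modify x 0 (· + 1)).modify (x + 1) 0 (· + 1))
        (PySem.Dict.empty : PySem.Dict Int Int)).values
      (fun v => v)).getD 0  -- Python's max raises on []; Pre_ excludes sequence = []

-- ===== PORT B =====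
-- B: histogram freq of sequence, candidate centers = set of v±1, v; max of windowed sums.
def maximize_equal_elements_alt (sequence : List Int) : Int :=
  -- freq[x] = freq.get(x, 0) + 1 is d.modify x 0 (· + 1); PySem.Dict.counter IS this fold
  -- (PySem.Dict.counter_eq_foldl, rfl); candidates = {c for v in freq for c in (v-1, v, v+1)}
  (PySem.List.max?
      ((PySem.Set.ofList ((PySem.Dict.counter sequence).keys.flatMap (fun v => [v - 1, v, v + 1]))).map
        (fun c => (PySem.Dict.counter sequence).getD (c - 1) 0 + (PySem.Dict.counter sequence).getD c 0
          + (PySem.Dict.counter sequence).getD (c + 1) 0))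
      (fun v => v)).getD 0  -- max of an order-independent value set; raises on [] like A

-- ===== PRECONDITION & SPEC =====
-- Pre_ excludes only the empty list, on which both A and B raise ValueError (max of empty).
def Pre_maximize_equal_elements (sequence : List Int) : Prop := sequence ≠ []
instance (sequence : List Int) : Decidable (Pre_maximize_equal_elements sequence) := by
  unfold Pre_maximize_equal_elements; infer_instance
def pvWitness_maximize_equal_elements : List Int := [0, 2, 1]

def Spec_maximize_equal_elements (sequence : List Int) (out : Int) : Prop := out = maximize_equal_elements_alt sequence
instance (sequence : List Int) (out : Int) : Decidable (Spec_maximize_equal_elements sequence out) := by unfold Spec_maximize_equal_elements; infer_instance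

-- ===== CLAIM (what is proved, stated in full; the proofs are below) =====
def Claim_equal_maximize_equal_elements : Prop := ∀ (sequence : List Int), Dom_maximize_equal_elements sequence → Pre_maximize_equal_elements sequence → Spec_maximize_equal_elements sequence (maximize_equal_elements sequence)

-- ===== LEMMAS AND PROOFS =====

-- the ±1-smeared sequence: A's dict is its Counter
def pvTriple (sequence : List Int) : List Int :=
  sequence.flatMap (fun x => [x - 1, x, x + 1])

theorem cntA_eq_counter (sequence : List Int) :
    sequence.foldl
      (fun d x =>
        ((d.modify (x - 1) 0 (· + 1)).modify x 0 (· + 1)).modify (x + 1) 0 (· + 1))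
      PySem.Dict.empty
    = PySem.Dict.counter (pvTriple sequence) := by
  rw [PySem.Dict.counter_eq_foldl]
  suffices h : ∀ (d : PySem.Dict Int Int),
      sequence.foldl
        (fun d x =>
          ((d.modify (x - 1) 0 (· + 1)).modify x 0 (· + 1)).modify (x + 1) 0 (· + 1)) d
      = (pvTriple sequence).foldl (fun d x => d.modify x 0 (· + 1)) d from h _
  induction sequence with
  | nil => intro d; simp [pvTriple]
  | cons x t ih =>
    intro d
    simp only [pvTriple, List.flatMap_cons, List.foldl_cons, List.foldl_append] at *
    exact ih _

theorem count_triple (sequence : List Int) (k : Int) :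
    (pvTriple sequence).count k
      = sequence.count (k - 1) + sequence.count k + sequence.count (k + 1) := by
  induction sequence with
  | nil => simp [pvTriple]
  | cons x t ih =>
    simp only [pvTriple] at ih
    simp only [pvTriple, List.flatMap_cons, List.count_append, List.count_cons,
      List.count_nil, beq_iff_eq, ih]
    split_ifs <;> omega

theorem mem_triple (sequence : List Int) (k : Int) :
    k ∈ pvTriple sequence ↔ ∃ x ∈ sequence, k = x - 1 ∨ k = x ∨ k = x + 1 := by
  simp only [pvTriple, List.mem_flatMap, List.mem_cons, List.not_mem_nil, or_false]

-- max(xs) depends only on the SET of values in the list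
theorem max?_id_eq_of_mem_iff (l₁ l₂ : List Int)
    (hm : ∀ z : Int, z ∈ l₁ ↔ z ∈ l₂) (hne : l₁ ≠ []) :
    PySem.List.max? l₁ (fun v => v) = PySem.List.max? l₂ (fun v => v) := by
  have hne₂ : l₂ ≠ [] := by
    intro h; subst h
    rcases List.exists_mem_of_ne_nil l₁ hne with ⟨a, ha⟩
    exact absurd ((hm a).mp ha) (List.not_mem_nil)
  rcases h₁ : PySem.List.max? l₁ (fun v => v) with _ | m₁
  · exact absurd ((PySem.List.max?_eq_none_iff _ _).mp h₁) hne
  rcases h₂ : PySem.List.max? l₂ (fun v => v) with _ | m₂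
  · exact absurd ((PySem.List.max?_eq_none_iff _ _).mp h₂) hne₂
  have hmem₁ := PySem.List.max?_mem h₁
  have hmem₂ := PySem.List.max?_mem h₂
  have hle₁ := PySem.List.max?_isMax h₂ m₁ ((hm m₁).mp hmem₁)
  have hle₂ := PySem.List.max?_isMax h₁ m₂ ((hm m₂).mpr hmem₂)
  simp only [Option.some.injEq]
  omega

theorem maximize_equal_elements_eq (sequence : List Int)
    (hne : sequence ≠ []) :
    maximize_equal_elements sequence = maximize_equal_elements_alt sequence := by
  unfold maximize_equal_elements maximize_equal_elements_alt
  rw [cntA_eq_counter]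
  rw [PySem.Dict.values_eq_map_keys _ (PySem.Dict.nodup_keys_counter _) 0]
  rw [PySem.Dict.keys_counter, PySem.Dict.keys_counter]
  have hw : ∀ k : Int,
      (PySem.Dict.counter (pvTriple sequence)).getD k 0
        = (PySem.Dict.counter sequence).getD (k - 1) 0
          + (PySem.Dict.counter sequence).getD k 0
          + (PySem.Dict.counter sequence).getD (k + 1) 0 := by
    intro k
    rw [PySem.Dict.getD_counter, PySem.Dict.getD_counter, PySem.Dict.getD_counter,
      PySem.Dict.getD_counter, count_triple]
    push_cast; ring
  congr 1
  apply max?_id_eq_of_mem_iff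
  · intro z
    simp only [List.mem_map, PySem.Set.mem_ofList, List.mem_flatMap]
    constructor
    · rintro ⟨k, hk, rfl⟩
      refine ⟨k, ?_, (hw k).symm⟩
      rcases (mem_triple sequence k).mp hk with ⟨x, hx, h⟩
      refine ⟨x, hx, ?_⟩
      simp only [List.mem_cons, List.not_mem_nil, or_false]
      omega
    · rintro ⟨c, ⟨v, hv, hc⟩, rfl⟩
      refine ⟨c, ?_, hw c⟩
      apply (mem_triple sequence c).mpr
      refine ⟨v, hv, ?_⟩
      simp only [List.mem_cons, List.not_mem_nil, or_false] at hc
      omega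
  · rcases List.exists_mem_of_ne_nil sequence hne with ⟨x, hx⟩
    intro h
    have : x ∈ pvTriple sequence := (mem_triple sequence x).mpr ⟨x, hx, by omega⟩
    have : x ∈ PySem.Set.ofList (pvTriple sequence) := (PySem.Set.mem_ofList _ _).mpr this
    have : ((PySem.Dict.counter (pvTriple sequence)).getD x 0)
        ∈ (PySem.Set.ofList (pvTriple sequence)).map
            (fun k => (PySem.Dict.counter (pvTriple sequence)).getD k 0) :=
      List.mem_map_of_mem this
    rw [h] at this
    exact absurd this (List.not_mem_nil)

-- ===== VERDICT (by name: the statement is the Claim_ definition above) =====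
theorem maximize_equal_elements_spec : Claim_equal_maximize_equal_elements := by
  intro sequence _ hpre
  unfold Spec_maximize_equal_elements
  exact maximize_equal_elements_eq sequence hpre
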